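-- pv_equiv track=rewrite | github.com/thenzen34/finpay_test_task | task1/task1.py | task1_use_foreach
-- ===== SOURCE A (Python) =====
-- def task1_use_foreach(input_str):
--     last_open = -1
--     need_remove = False
--     ix = 0
--     for x in input_str:
--         if '(' == x:
--             if not need_remove:
--                 last_open = ix
--             need_remove = True
--         if ')' == x:
--             need_remove = False
--         ix += 1
--     result_str = input_str[0:last_open if need_remove else ix]
--
--     return result_str
-- ===== SOURCE B (Python) =====
-- def task1_use_foreach(input_str):
--     # scan right-to-left: remember leftmost '(' seen, stop at the first ')'
--     cut = None
--     for i in range(len(input_str) - 1, -1, -1):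
--         c = input_str[i]
--         if c == ')':
--             break
--         if c == '(':
--             cut = i
--     return input_str if cut is None else input_str[:cut]
-- ===== Notes on version B (the rewrite author's own statement) =====
-- stated objective: alternative
-- what changed: Replaces A's full left-to-right scan with a need_remove flag by a right-to-left scan that records the leftmost '(' seen and stops early at the first ')'.
import Mathlib
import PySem

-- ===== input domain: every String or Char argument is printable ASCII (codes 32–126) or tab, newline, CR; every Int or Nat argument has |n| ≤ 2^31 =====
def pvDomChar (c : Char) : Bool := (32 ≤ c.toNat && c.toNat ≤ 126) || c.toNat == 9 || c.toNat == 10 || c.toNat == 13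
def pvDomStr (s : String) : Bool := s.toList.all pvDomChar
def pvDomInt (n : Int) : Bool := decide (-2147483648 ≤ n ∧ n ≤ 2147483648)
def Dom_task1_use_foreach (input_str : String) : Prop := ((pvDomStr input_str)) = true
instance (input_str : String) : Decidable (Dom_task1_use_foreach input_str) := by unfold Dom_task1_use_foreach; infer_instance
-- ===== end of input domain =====

-- B replaces A's left-to-right stateful scan by a right-to-left scan that stops at the
-- first ')' (objective: alternative — early exit, no need_remove flag; same return value).

-- ===== PORT A =====
-- loop body of A: the two sequential if-tests on x, then ix += 1
def task1StepA (acc : Int × Bool × Int) (x : Char) : Int × Bool × Int :=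
  let last_open := if '(' = x then (if !acc.2.1 then acc.2.2 else acc.1) else acc.1
  let need_remove := if '(' = x then true else acc.2.1
  let need_remove := if ')' = x then false else need_remove
  (last_open, need_remove, acc.2.2 + 1)

def task1_use_foreach (input_str : String) : String :=
  let st := input_str.toList.foldl task1StepA ((-1 : Int), false, (0 : Int))
  PySem.Str.slice input_str (some 0) (some (if st.2.1 then st.1 else st.2.2))

-- ===== PORT B =====
-- B's for-loop over range(len-1, -1, -1) with break: recursion over the reversed
-- character list; an element's original index is the length of the remaining tail.
def task1Go : List Char → Option Nat → Option Nat
  | [], cut => cut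
  | c :: rest, cut =>
      if c = ')' then cut
      else task1Go rest (if c = '(' then some rest.length else cut)

def task1_use_foreach_alt (input_str : String) : String :=
  match task1Go input_str.toList.reverse none with
  | none => input_str
  | some i => PySem.Str.slice input_str none (some (i : Int))

-- ===== PRECONDITION & SPEC =====
def Spec_task1_use_foreach (input_str : String) (out : String) : Prop := out = task1_use_foreach_alt input_str
instance (input_str : String) (out : String) : Decidable (Spec_task1_use_foreach input_str out) := by unfold Spec_task1_use_foreach; infer_instance

-- ===== CLAIM (what is proved, stated in full; the proofs are below) =====
def Claim_equal_task1_use_foreach : Prop := ∀ (input_str : String), Dom_task1_use_foreach input_str → Spec_task1_use_foreach input_str (task1_use_foreach input_str)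

-- ===== LEMMAS AND PROOFS =====

-- the accumulator of B's scan is returned unchanged unless some '(' sets it
lemma task1Go_acc (rs : List Char) (acc : Option Nat) :
    task1Go rs acc = match task1Go rs none with
      | some i => some i
      | none => acc := by
  induction rs generalizing acc with
  | nil => simp [task1Go]
  | cons c rest ih =>
      by_cases hc : c = ')'
      · simp [task1Go, hc]
      · by_cases ho : c = '('
        · subst ho
          have h1 : ∀ a : Option Nat, task1Go ('(' :: rest) a = task1Go rest (some rest.length) := by
            intro a; simp only [task1Go]; simp [hc]
          rw [h1, h1, ih (some rest.length)]
          cases task1Go rest none <;> simp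
        · have h1 : ∀ a : Option Nat, task1Go (c :: rest) a = task1Go rest a := by
            intro a; simp only [task1Go]; simp [hc, ho]
          rw [h1, h1, ih acc]

-- A's loop state, characterised by B's right-to-left scan
lemma task1_inv (cs : List Char) :
    (cs.foldl task1StepA ((-1 : Int), false, (0 : Int))).2.2 = (cs.length : Int) ∧
    (task1Go cs.reverse none = none → (cs.foldl task1StepA ((-1 : Int), false, (0 : Int))).2.1 = false) ∧
    (∀ i, task1Go cs.reverse none = some i →
      (cs.foldl task1StepA ((-1 : Int), false, (0 : Int))).2.1 = true ∧
      (cs.foldl task1StepA ((-1 : Int), false, (0 : Int))).1 = (i : Int)) := by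
  induction cs using List.reverseRecOn with
  | nil => simp [task1Go]
  | append_singleton cs c ih =>
      obtain ⟨hix, hnone, hsome⟩ := ih
      have hrev : (cs ++ [c]).reverse = c :: cs.reverse := by simp
      rw [List.foldl_append, List.foldl_cons, List.foldl_nil, hrev]
      have hixgoal : (task1StepA (List.foldl task1StepA ((-1 : Int), false, (0 : Int)) cs) c).2.2
          = (((cs ++ [c]).length : Nat) : Int) := by
        simp only [task1StepA, List.length_append, List.length_cons, List.length_nil]
        rw [hix]; push_cast; omega
      by_cases hc : c = ')'
      · subst hc
        refine ⟨hixgoal, ?_, ?_⟩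
        · intro _; simp [task1StepA]
        · intro i hi; simp only [task1Go] at hi; simp at hi
      · by_cases ho : c = '('
        · subst ho
          have hgo : task1Go ('(' :: cs.reverse) none = task1Go cs.reverse (some cs.reverse.length) := by
            simp only [task1Go]; simp [hc]
          rw [hgo, task1Go_acc]
          refine ⟨hixgoal, ?_, ?_⟩
          · intro h; cases hg : task1Go cs.reverse none <;> simp [hg] at h
          · intro i hi
            cases hg : task1Go cs.reverse none with
            | none =>
                simp only [hg] at hi
                have hil : cs.reverse.length = i := by simpa using hi
                subst hil
                simp [task1StepA, hnone hg, hix]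
            | some j =>
                simp only [hg] at hi
                have hji : j = i := by simpa using hi
                subst hji
                obtain ⟨hnr, hlo⟩ := hsome j hg
                simp [task1StepA, hnr, hlo]
        · have hgo : task1Go (c :: cs.reverse) none = task1Go cs.reverse none := by
            simp only [task1Go]; simp [hc, ho]
          rw [hgo]
          have hc' : ¬ ')' = c := fun h => hc h.symm
          have ho' : ¬ '(' = c := fun h => ho h.symm
          refine ⟨hixgoal, ?_, ?_⟩
          · intro h; simp [task1StepA, hc', ho', hnone h]
          · intro i hi
            obtain ⟨hnr, hlo⟩ := hsome i hi
            simp [task1StepA, hc', ho', hnr, hlo]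

-- ===== VERDICT (by name: the statement is the Claim_ definition above) =====
theorem task1_use_foreach_spec : Claim_equal_task1_use_foreach := by
  intro s _
  unfold Spec_task1_use_foreach task1_use_foreach task1_use_foreach_alt
  obtain ⟨hix, hnone, hsome⟩ := task1_inv s.toList
  cases hg : task1Go s.toList.reverse none with
  | none =>
      have hnr := hnone hg
      apply String.toList_inj.mp
      simp [pysem, hnr, hix]
  | some i =>
      obtain ⟨hnr, hlo⟩ := hsome i hg
      apply String.toList_inj.mp
      simp [pysem, hnr, hlo]
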